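-- pv_equiv track=rewrite | github.com/YaroslavAnanich/AOIS | lab1/binary_operations.py | additional_code
-- ===== SOURCE A (Python) =====
-- def additional_code(inverse):
--     if inverse[0] == 1:
--         for i in range(7, 0, -1):
--             if inverse[i] == 0:
--                 inverse[i] = 1
--                 return inverse
--             else:
--                 inverse[i] = 0
--     return inverse
-- ===== SOURCE B (Python) =====
-- # B mutates `inverse` in place exactly like A (return value = same list object).
-- def additional_code(inverse):
--     if inverse[0] == 1:
--         val = 0
--         for i in range(1, 8):
--             val = val * 2 + inverse[i]
--         val = (val + 1) & 0x7F
--         for i in range(7, 0, -1):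
--             inverse[i] = val & 1
--             val >>= 1
--     return inverse
-- ===== Notes on version B (the rewrite author's own statement) =====
-- stated objective: alternative
-- what changed: Replaced A's ripple-carry bit loop with early return by a fold of bits 1..7 into an integer, an increment-and-mask ((val+1)&0x7F), and a write-back of the 7 low bits.
-- outside the precondition, e.g. on additional_code([]): A raises IndexError, B raises IndexError; on additional_code([1, 0, 0]): A raises IndexError, B raises IndexError
import Mathlib
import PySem

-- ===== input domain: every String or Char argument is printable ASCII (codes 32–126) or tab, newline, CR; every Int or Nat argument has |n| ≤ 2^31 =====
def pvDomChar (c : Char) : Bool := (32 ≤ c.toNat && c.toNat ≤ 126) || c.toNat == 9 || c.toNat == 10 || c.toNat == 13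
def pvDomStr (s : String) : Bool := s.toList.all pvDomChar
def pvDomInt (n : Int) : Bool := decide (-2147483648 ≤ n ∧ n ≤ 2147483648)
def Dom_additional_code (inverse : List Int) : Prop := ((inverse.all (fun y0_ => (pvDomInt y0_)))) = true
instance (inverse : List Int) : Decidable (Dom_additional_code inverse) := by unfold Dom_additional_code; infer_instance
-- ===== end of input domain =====

-- B replaces the ripple-carry loop by fold-to-int, increment-and-mask, write-back (alternative
-- decomposition, same cost); B mutates the list in place exactly as A does, the equivalence
-- proved here is about the returned list value.

-- ===== PORT A =====
-- the `for i in range(7, 0, -1)` loop with early return; `i` counts down, the index is i itself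
def acLoopA (i : Nat) (inv : List Int) : List Int :=
  match i with
  | 0 => inv
  | j+1 => if inv.getD (j+1) 0 == 0 then inv.set (j+1) 1 else acLoopA j (inv.set (j+1) 0)

def additional_code (inverse : List Int) : List Int :=
  if inverse.getD 0 0 == 1 then acLoopA 7 inverse else inverse

-- ===== PORT B =====
-- `for i in range(7, 0, -1): inverse[i] = val & 1; val >>= 1`; val is nonnegative here, so
-- `& 1` is Python `% 2` and `>>= 1` is Python `// 2` (exact for the nonnegative val that occurs)
def acWriteB (i : Nat) (v : Int) (inv : List Int) : List Int :=
  match i with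
  | 0 => inv
  | j+1 => acWriteB j (PySem.Int.floordiv v 2) (inv.set (j+1) (PySem.Int.mod v 2))

def additional_code_alt (inverse : List Int) : List Int :=
  if inverse.getD 0 0 == 1 then
    let val := (List.range' 1 7).foldl (fun v i => v * 2 + inverse.getD i 0) 0
    -- `(val + 1) & 0x7F`: val + 1 is a nonnegative value here, so the mask equals Python `% 128`
    let val := PySem.Int.mod (val + 1) 128
    acWriteB 7 val inverse
  else inverse

-- ===== PRECONDITION & SPEC =====
-- Pre_ excludes: the empty list and lists with inverse[0] == 1 shorter than 8 (A raises
-- IndexError there, as does B), and lists with inverse[0] == 1 whose positions 1..7 hold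
-- values other than 0/1 — outside the binary-code domain A's carry loop treats any nonzero
-- entry as a set bit while B's arithmetic uses the numeric value, so neither result is
-- specified (see cites).
def Pre_additional_code (inverse : List Int) : Prop :=
  inverse ≠ [] ∧
  (inverse.getD 0 0 = 1 →
    8 ≤ inverse.length ∧
    ∀ i ∈ ([1, 2, 3, 4, 5, 6, 7] : List Nat), inverse.getD i 0 = 0 ∨ inverse.getD i 0 = 1)
instance (inverse : List Int) : Decidable (Pre_additional_code inverse) := by
  unfold Pre_additional_code; infer_instance

def pvWitness_additional_code : List Int := [1, 0, 1, 1, 0, 1, 1, 1]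

def Spec_additional_code (inverse : List Int) (out : List Int) : Prop := out = additional_code_alt inverse
instance (inverse : List Int) (out : List Int) : Decidable (Spec_additional_code inverse out) := by unfold Spec_additional_code; infer_instance

-- ===== CLAIM (what is proved, stated in full; the proofs are below) =====
def Claim_equal_additional_code : Prop := ∀ (inverse : List Int), Dom_additional_code inverse → Pre_additional_code inverse → Spec_additional_code inverse (additional_code inverse)

-- ===== LEMMAS AND PROOFS =====

-- ===== VERDICT (by name: the statement is the Claim_ definition above) =====
theorem additional_code_spec : Claim_equal_additional_code := by
  intro inverse _ hpre
  unfold Spec_additional_code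
  obtain ⟨hne, hhd⟩ := hpre
  rcases inverse with _ | ⟨a, rest⟩
  · exact absurd rfl hne
  by_cases ha : a = 1
  · subst ha
    obtain ⟨hlen, hbits⟩ := hhd (by simp)
    rcases rest with _ | ⟨b1, rest⟩; · simp at hlen
    rcases rest with _ | ⟨b2, rest⟩; · simp at hlen
    rcases rest with _ | ⟨b3, rest⟩; · simp at hlen
    rcases rest with _ | ⟨b4, rest⟩; · simp at hlen
    rcases rest with _ | ⟨b5, rest⟩; · simp at hlen
    rcases rest with _ | ⟨b6, rest⟩; · simp at hlen
    rcases rest with _ | ⟨b7, rest⟩; · simp at hlen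
    have h1 := hbits 1 (by simp); have h2 := hbits 2 (by simp)
    have h3 := hbits 3 (by simp); have h4 := hbits 4 (by simp)
    have h5 := hbits 5 (by simp); have h6 := hbits 6 (by simp)
    have h7 := hbits 7 (by simp)
    simp only [List.getD, List.getElem?_cons_succ, List.getElem?_cons_zero,
      Option.getD_some] at h1 h2 h3 h4 h5 h6 h7
    rcases h1 with rfl | rfl <;> rcases h2 with rfl | rfl <;> rcases h3 with rfl | rfl <;>
      rcases h4 with rfl | rfl <;> rcases h5 with rfl | rfl <;> rcases h6 with rfl | rfl <;>
      rcases h7 with rfl | rfl <;> rfl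
  · simp [additional_code, additional_code_alt, List.getD, ha]
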